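-- pv_equiv track=rewrite | github.com/yasufumi-nakata/Pytra | src/toolchain/compile/east3_opt_passes/cpp_list_value_local_hint_pass.py | _is_concrete_type
-- ===== SOURCE A (Python) =====
-- from typing import Any
--
-- def _normalize_type_name(value: Any) -> str:
--     if isinstance(value, str):
--         s: str = value
--         txt = s.strip()
--         if txt != "":
--             return txt
--     return "unknown"
--
-- def _split_generic_types(text: str) -> list[str]:
--     out: list[str] = []
--     part = ""
--     depth = 0
--     for ch in text:
--         if ch in "<[":
--             depth += 1
--             part += ch
--             continue
--         if ch in ">]":
--             if depth > 0:
--                 depth -= 1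
--             part += ch
--             continue
--         if ch == "," and depth == 0:
--             out.append(part.strip())
--             part = ""
--             continue
--         part += ch
--     last = part.strip()
--     if last != "":
--         out.append(last)
--     return out
--
-- def _is_concrete_type(type_name: str) -> bool:
--     t = _normalize_type_name(type_name)
--     if t in {"", "unknown", "Any", "object", "None"}:
--         return False
--     if "|" in t:
--         for part in t.split("|"):
--             if not _is_concrete_type(part):
--                 return False
--         return True
--     if t.startswith("list[") and t.endswith("]"):
--         parts = _split_generic_types(t[5:-1])
--         return len(parts) == 1 and _is_concrete_type(parts[0])
--     if t.startswith("tuple[") and t.endswith("]"):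
--         parts = _split_generic_types(t[6:-1])
--         return len(parts) > 0 and all(_is_concrete_type(part) for part in parts)
--     if t.startswith("dict[") and t.endswith("]"):
--         parts = _split_generic_types(t[5:-1])
--         return len(parts) == 2 and _is_concrete_type(parts[0]) and _is_concrete_type(parts[1])
--     if t.startswith("set[") and t.endswith("]"):
--         parts = _split_generic_types(t[4:-1])
--         return len(parts) == 1 and _is_concrete_type(parts[0])
--     return True
-- ===== SOURCE B (Python) =====
-- from typing import Any
--
-- def _normalize_type_name(value: Any) -> str:
--     if isinstance(value, str):
--         s: str = value
--         txt = s.strip()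
--         if txt != "":
--             return txt
--     return "unknown"
--
-- def _split_generic_types(text: str) -> list[str]:
--     out: list[str] = []
--     part = ""
--     depth = 0
--     for ch in text:
--         if ch in "<[":
--             depth += 1
--             part += ch
--             continue
--         if ch in ">]":
--             if depth > 0:
--                 depth -= 1
--             part += ch
--             continue
--         if ch == "," and depth == 0:
--             out.append(part.strip())
--             part = ""
--             continue
--         part += ch
--     last = part.strip()
--     if last != "":
--         out.append(last)
--     return out
--
-- # container head -> (minimum arity, maximum arity or None for unbounded)
-- _ARITY = {"list": (1, 1), "set": (1, 1), "dict": (2, 2), "tuple": (1, None)}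
--
-- def _is_concrete_type(type_name: str) -> bool:
--     # Iterative worklist: a stack of type strings still to be validated; a string's
--     # generic/union arguments are pushed instead of recursed into.  Container dispatch
--     # extracts the head before the first '[' and looks it up in the _ARITY table.
--     pending = [type_name]
--     while pending:
--         t = _normalize_type_name(pending.pop())
--         if t in {"", "unknown", "Any", "object", "None"}:
--             return False
--         if "|" in t:
--             pending.extend(t.split("|"))
--             continue
--         if t.endswith("]") and "[" in t:
--             i = t.index("[")
--             info = _ARITY.get(t[:i])
--             if info is not None:
--                 lo, hi = info
--                 parts = _split_generic_types(t[i + 1:-1])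
--                 if len(parts) < lo or (hi is not None and len(parts) > hi):
--                     return False
--                 pending.extend(parts)
--     return True
-- ===== Notes on version B (the rewrite author's own statement) =====
-- stated objective: alternative
-- what changed: A's recursive descent with four hard-coded startswith container branches is replaced by an iterative worklist: a stack of pending type strings is popped and a popped string's union/generic arguments are pushed back, with container dispatch done by extracting the head before the first '[' and looking its arity bounds up in a table instead of a startswith chain.
import Mathlib
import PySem

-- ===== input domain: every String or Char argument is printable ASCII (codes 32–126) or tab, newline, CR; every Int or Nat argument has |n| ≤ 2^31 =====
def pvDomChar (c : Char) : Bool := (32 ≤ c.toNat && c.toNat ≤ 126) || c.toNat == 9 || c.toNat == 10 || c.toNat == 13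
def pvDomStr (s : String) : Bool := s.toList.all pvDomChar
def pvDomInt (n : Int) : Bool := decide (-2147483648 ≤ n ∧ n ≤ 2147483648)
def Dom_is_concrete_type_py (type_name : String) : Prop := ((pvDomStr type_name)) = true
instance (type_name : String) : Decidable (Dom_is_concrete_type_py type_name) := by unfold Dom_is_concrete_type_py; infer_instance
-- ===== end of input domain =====

-- B replaces A's recursion and its four hard-coded startswith container branches by an
-- iterative worklist (explicit stack of pending type strings) with table-driven dispatch on
-- the head extracted before the first '['; objective: alternative. Return values only; no mutation.

-- shared helpers, kept verbatim in both Source A and Source B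
-- _normalize_type_name (value is always a str here, so the isinstance branch is always taken)
def pvNormalize (s : List Char) : List Char :=
  let txt := PySem.Chars.strip s
  if txt ≠ [] then txt else "unknown".toList

-- one step of _split_generic_types' for-loop, on state (out, part, depth)
def pvSGStep (acc : List (List Char) × List Char × Nat) (ch : Char) :
    List (List Char) × List Char × Nat :=
  let (out, part, depth) := acc
  if ch = '<' ∨ ch = '[' then (out, part ++ [ch], depth + 1)
  else if ch = '>' ∨ ch = ']' then
    (out, part ++ [ch], if depth > 0 then depth - 1 else depth)
  else if ch = ',' ∧ depth = 0 then (out ++ [PySem.Chars.strip part], [], depth)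
  else (out, part ++ [ch], depth)

-- _split_generic_types: fold the loop body over the characters
def pvSplitGeneric (text : List Char) : List (List Char) :=
  let st := text.foldl pvSGStep ([], [], 0)
  let last := PySem.Chars.strip st.2.1
  if last ≠ [] then st.1 ++ [last] else st.1

-- ===== PORT A =====
-- fuel-guarded recursion (fuel only makes the recursion structural; it never runs out,
-- since every recursive call is on a strictly shorter string)
def pvIsA : Nat → List Char → Bool
  | 0, _ => false
  | n + 1, s =>
    let t := pvNormalize s
    if t = [] ∨ t = "unknown".toList ∨ t = "Any".toList ∨ t = "object".toList ∨ t = "None".toList then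
      false
    else if PySem.Chars.isIn ['|'] t then
      (PySem.Chars.splitOn t ['|']).all (pvIsA n)
    else if PySem.Chars.startswith t "list[".toList && PySem.Chars.endswith t [']'] then
      let parts := pvSplitGeneric (PySem.Chars.slice t (some 5) (some (-1)))
      decide (parts.length = 1) && pvIsA n (parts[0]?.getD [])
    else if PySem.Chars.startswith t "tuple[".toList && PySem.Chars.endswith t [']'] then
      let parts := pvSplitGeneric (PySem.Chars.slice t (some 6) (some (-1)))
      decide (0 < parts.length) && parts.all (pvIsA n)
    else if PySem.Chars.startswith t "dict[".toList && PySem.Chars.endswith t [']'] then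
      let parts := pvSplitGeneric (PySem.Chars.slice t (some 5) (some (-1)))
      decide (parts.length = 2) && (pvIsA n (parts[0]?.getD []) && pvIsA n (parts[1]?.getD []))
    else if PySem.Chars.startswith t "set[".toList && PySem.Chars.endswith t [']'] then
      let parts := pvSplitGeneric (PySem.Chars.slice t (some 4) (some (-1)))
      decide (parts.length = 1) && pvIsA n (parts[0]?.getD [])
    else true

def is_concrete_type_py (type_name : String) : Bool :=
  pvIsA (type_name.toList.length + 1) type_name.toList

-- ===== PORT B =====
-- Source B's _ARITY table: container head -> (minimum arity, maximum arity or none)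
def pvArityTable : List (List Char × (Nat × Option Nat)) :=
  [("list".toList, (1, some 1)), ("set".toList, (1, some 1)),
   ("dict".toList, (2, some 2)), ("tuple".toList, (1, none))]

-- Source B's while-loop over the pending stack.  The Lean list's HEAD models the Python list's
-- END (the top of the stack): pending.pop() = the head, pending.extend(parts) = parts.reverse
-- prepended.  Fuel only makes the loop structural; it never runs out (pvLoopB_eq below).
def pvLoopB : Nat → List (List Char) → Bool
  | _, [] => true
  | 0, _ :: _ => false
  | f + 1, s :: rest =>
    let t := pvNormalize s
    if t = [] ∨ t = "unknown".toList ∨ t = "Any".toList ∨ t = "object".toList ∨ t = "None".toList then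
      false
    else if PySem.Chars.isIn ['|'] t then
      pvLoopB f ((PySem.Chars.splitOn t ['|']).reverse ++ rest)
    else if PySem.Chars.endswith t [']'] && PySem.Chars.isIn ['['] t then
      match pvArityTable.lookup (PySem.Chars.slice t none (some (PySem.Chars.find t ['[']))) with
      | some (lo, hi) =>
        let parts := pvSplitGeneric (PySem.Chars.slice t (some (PySem.Chars.find t ['['] + 1)) (some (-1)))
        if decide (parts.length < lo) || (match hi with | some h => decide (h < parts.length) | none => false) then
          false
        else pvLoopB f (parts.reverse ++ rest)
      | none => pvLoopB f rest
    else pvLoopB f rest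

def is_concrete_type_py_alt (type_name : String) : Bool :=
  pvLoopB (2 * type_name.toList.length + 1) [type_name.toList]

-- ===== PRECONDITION & SPEC =====
def Spec_is_concrete_type_py (type_name : String) (out : Bool) : Prop := out = is_concrete_type_py_alt type_name
instance (type_name : String) (out : Bool) : Decidable (Spec_is_concrete_type_py type_name out) := by unfold Spec_is_concrete_type_py; infer_instance

-- ===== CLAIM (what is proved, stated in full; the proofs are below) =====
def Claim_equal_is_concrete_type_py : Prop := ∀ (type_name : String), Dom_is_concrete_type_py type_name → Spec_is_concrete_type_py type_name (is_concrete_type_py type_name)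

-- ===== LEMMAS AND PROOFS =====

-- ---- proof-only helpers ----

-- sum of (length+1) over a list of parts, and the stack measure Σ (2·length+1)
def pvSum1 (ps : List (List Char)) : Nat := (ps.map (fun l => l.length + 1)).sum
def pvMu (ps : List (List Char)) : Nat := (ps.map (fun l => 2 * l.length + 1)).sum

-- simple recursive model of str.split(sep) for a one-character separator
def pvSplit1 (c : Char) (pre : List Char) : List Char → List (List Char)
  | [] => [pre]
  | a :: l => if a = c then pre :: pvSplit1 c [] l else pvSplit1 c (pre ++ [a]) l

-- arity-bounds failure test shared by the analyses (proof-only)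
def pvBad (lo : Nat) (hi : Option Nat) (parts : List (List Char)) : Bool :=
  decide (parts.length < lo) || (match hi with | some h => decide (h < parts.length) | none => false)

-- A's four-branch container chain, abstracted over the recursive call (proof-only)
def pvChainA (g : List Char → Bool) (t : List Char) : Bool :=
  if PySem.Chars.startswith t "list[".toList && PySem.Chars.endswith t [']'] then
    decide ((pvSplitGeneric (PySem.Chars.slice t (some 5) (some (-1)))).length = 1) &&
      g ((pvSplitGeneric (PySem.Chars.slice t (some 5) (some (-1))))[0]?.getD [])
  else if PySem.Chars.startswith t "tuple[".toList && PySem.Chars.endswith t [']'] then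
    decide (0 < (pvSplitGeneric (PySem.Chars.slice t (some 6) (some (-1)))).length) &&
      (pvSplitGeneric (PySem.Chars.slice t (some 6) (some (-1)))).all g
  else if PySem.Chars.startswith t "dict[".toList && PySem.Chars.endswith t [']'] then
    decide ((pvSplitGeneric (PySem.Chars.slice t (some 5) (some (-1)))).length = 2) &&
      (g ((pvSplitGeneric (PySem.Chars.slice t (some 5) (some (-1))))[0]?.getD []) &&
       g ((pvSplitGeneric (PySem.Chars.slice t (some 5) (some (-1))))[1]?.getD []))
  else if PySem.Chars.startswith t "set[".toList && PySem.Chars.endswith t [']'] then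
    decide ((pvSplitGeneric (PySem.Chars.slice t (some 4) (some (-1)))).length = 1) &&
      g ((pvSplitGeneric (PySem.Chars.slice t (some 4) (some (-1))))[0]?.getD [])
  else true

-- ---- unfolding lemmas for the two ports ----

lemma pvIsA_succ (n : Nat) (s : List Char) :
    pvIsA (n + 1) s =
      (if pvNormalize s = [] ∨ pvNormalize s = "unknown".toList ∨ pvNormalize s = "Any".toList ∨
          pvNormalize s = "object".toList ∨ pvNormalize s = "None".toList then
        false
      else if PySem.Chars.isIn ['|'] (pvNormalize s) then
        (PySem.Chars.splitOn (pvNormalize s) ['|']).all (pvIsA n)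
      else pvChainA (pvIsA n) (pvNormalize s)) := by
  simp only [pvIsA, pvChainA]

lemma pvLoopB_res (f : Nat) (s : List Char) (rest : List (List Char))
    (hR : pvNormalize s = [] ∨ pvNormalize s = "unknown".toList ∨ pvNormalize s = "Any".toList ∨
          pvNormalize s = "object".toList ∨ pvNormalize s = "None".toList) :
    pvLoopB (f + 1) (s :: rest) = false := by
  simp only [pvLoopB]
  rw [if_pos hR]

lemma pvLoopB_union (f : Nat) (s : List Char) (rest : List (List Char))
    (hR : ¬(pvNormalize s = [] ∨ pvNormalize s = "unknown".toList ∨ pvNormalize s = "Any".toList ∨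
          pvNormalize s = "object".toList ∨ pvNormalize s = "None".toList))
    (hU : PySem.Chars.isIn ['|'] (pvNormalize s) = true) :
    pvLoopB (f + 1) (s :: rest) =
      pvLoopB f ((PySem.Chars.splitOn (pvNormalize s) ['|']).reverse ++ rest) := by
  simp only [pvLoopB]
  rw [if_neg hR, if_pos hU]

lemma pvLoopB_nobr (f : Nat) (s : List Char) (rest : List (List Char))
    (hR : ¬(pvNormalize s = [] ∨ pvNormalize s = "unknown".toList ∨ pvNormalize s = "Any".toList ∨
          pvNormalize s = "object".toList ∨ pvNormalize s = "None".toList))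
    (hU : ¬ PySem.Chars.isIn ['|'] (pvNormalize s) = true)
    (hbr : ¬ (PySem.Chars.endswith (pvNormalize s) [']'] && PySem.Chars.isIn ['['] (pvNormalize s)) = true) :
    pvLoopB (f + 1) (s :: rest) = pvLoopB f rest := by
  simp only [pvLoopB]
  rw [if_neg hR, if_neg hU, if_neg hbr]

lemma pvLoopB_brnone (f : Nat) (s : List Char) (rest : List (List Char))
    (hR : ¬(pvNormalize s = [] ∨ pvNormalize s = "unknown".toList ∨ pvNormalize s = "Any".toList ∨
          pvNormalize s = "object".toList ∨ pvNormalize s = "None".toList))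
    (hU : ¬ PySem.Chars.isIn ['|'] (pvNormalize s) = true)
    (hbr : (PySem.Chars.endswith (pvNormalize s) [']'] && PySem.Chars.isIn ['['] (pvNormalize s)) = true)
    (hl : pvArityTable.lookup (PySem.Chars.slice (pvNormalize s) none
            (some (PySem.Chars.find (pvNormalize s) ['[']))) = none) :
    pvLoopB (f + 1) (s :: rest) = pvLoopB f rest := by
  simp only [pvLoopB]
  rw [if_neg hR, if_neg hU, if_pos hbr, hl]

lemma pvLoopB_br (f : Nat) (s : List Char) (rest : List (List Char)) (lo : Nat) (hi : Option Nat)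
    (hR : ¬(pvNormalize s = [] ∨ pvNormalize s = "unknown".toList ∨ pvNormalize s = "Any".toList ∨
          pvNormalize s = "object".toList ∨ pvNormalize s = "None".toList))
    (hU : ¬ PySem.Chars.isIn ['|'] (pvNormalize s) = true)
    (hbr : (PySem.Chars.endswith (pvNormalize s) [']'] && PySem.Chars.isIn ['['] (pvNormalize s)) = true)
    (hl : pvArityTable.lookup (PySem.Chars.slice (pvNormalize s) none
            (some (PySem.Chars.find (pvNormalize s) ['[']))) = some (lo, hi)) :
    pvLoopB (f + 1) (s :: rest) =
      (if pvBad lo hi (pvSplitGeneric (PySem.Chars.slice (pvNormalize s)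
            (some (PySem.Chars.find (pvNormalize s) ['['] + 1)) (some (-1)))) = true then false
       else pvLoopB f ((pvSplitGeneric (PySem.Chars.slice (pvNormalize s)
            (some (PySem.Chars.find (pvNormalize s) ['['] + 1)) (some (-1)))).reverse ++ rest)) := by
  simp only [pvLoopB, pvBad]
  rw [if_neg hR, if_neg hU, if_pos hbr, hl]
  rfl

-- ---- split('|') via a simple recursion ----

lemma pv_go_eq (c : Char) : ∀ (fuel : Nat) (l cur : List Char) (acc : List (List Char)),
    l.length < fuel →
    PySem.Chars.splitOn.go [c] fuel l cur acc = acc.reverse ++ pvSplit1 c cur.reverse l := by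
  intro fuel
  induction fuel with
  | zero => intro l cur acc h; exact absurd h (Nat.not_lt_zero _)
  | succ fuel ih =>
    intro l cur acc h
    cases l with
    | nil => simp [PySem.Chars.splitOn.go, pvSplit1]
    | cons a rest =>
      by_cases hc : a = c
      · subst hc
        have hpre : [a].isPrefixOf (a :: rest) = true := by simp [List.isPrefixOf]
        simp only [PySem.Chars.splitOn.go, hpre, if_true, List.length_cons, List.length_nil,
          List.drop_succ_cons, List.drop_zero]
        rw [ih rest [] (cur.reverse :: acc) (by simpa using Nat.lt_of_succ_lt_succ h)]
        simp [pvSplit1]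
      · have hpre : [c].isPrefixOf (a :: rest) = false := by
          simp only [List.isPrefixOf, List.isPrefixOf_nil_left, Bool.and_true, beq_iff_eq]
          exact decide_eq_false (fun h' => hc h'.symm)
        simp only [PySem.Chars.splitOn.go, hpre, Bool.false_eq_true, if_false]
        rw [ih rest (a :: cur) acc (by simpa using Nat.lt_of_succ_lt_succ h)]
        simp [pvSplit1, hc]

lemma pv_splitOn_eq (c : Char) (s : List Char) :
    PySem.Chars.splitOn s [c] = pvSplit1 c [] s := by
  unfold PySem.Chars.splitOn
  rw [pv_go_eq c (s.length + 1) s [] [] (Nat.lt_succ_self _)]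
  simp

lemma pv_split1_sum1 (c : Char) : ∀ (l pre : List Char),
    pvSum1 (pvSplit1 c pre l) = pre.length + l.length + 1 := by
  intro l
  induction l with
  | nil => intro pre; simp [pvSplit1, pvSum1]
  | cons a l ih =>
    intro pre
    by_cases hc : a = c
    · simp only [pvSplit1, if_pos hc, pvSum1, List.map_cons, List.sum_cons]
      have h := ih []
      simp only [pvSum1, List.length_nil] at h
      rw [h]
      simp only [List.length_cons]
      omega
    · simp only [pvSplit1, if_neg hc]
      rw [ih (pre ++ [a])]
      simp only [List.length_append, List.length_cons, List.length_nil]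
      omega

lemma pv_split1_len (c : Char) : ∀ (l pre : List Char),
    (pvSplit1 c pre l).length = l.count c + 1 := by
  intro l
  induction l with
  | nil => intro pre; simp [pvSplit1]
  | cons a l ih =>
    intro pre
    by_cases hc : a = c
    · simp only [pvSplit1, if_pos hc, List.length_cons, ih [], List.count_cons]
      simp [hc]
    · simp only [pvSplit1, if_neg hc, ih (pre ++ [a]), List.count_cons]
      simp [fun h => hc (by exact h)]

lemma pv_split1_part (c : Char) : ∀ (l pre p : List Char), p ∈ pvSplit1 c pre l →
    p.length + l.count c ≤ pre.length + l.length := by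
  intro l
  induction l with
  | nil =>
    intro pre p hp
    simp only [pvSplit1, List.mem_singleton] at hp
    subst hp
    simp
  | cons a l ih =>
    intro pre p hp
    by_cases hc : a = c
    · simp only [pvSplit1, if_pos hc, List.mem_cons] at hp
      have hcnt : ((a :: l).count c) = l.count c + 1 := by simp [List.count_cons, hc]
      rcases hp with hp | hp
      · subst hp
        have := List.count_le_length (l := l) (a := c)
        simp only [hcnt, List.length_cons]
        omega
      · have := ih [] p hp
        simp only [List.length_nil] at this
        simp only [hcnt, List.length_cons]
        omega
    · simp only [pvSplit1, if_neg hc, List.mem_cons] at hp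
      have hcnt : ((a :: l).count c) = l.count c := by
        simp only [List.count_cons]
        simp [fun h => hc h]
      have := ih (pre ++ [a]) p hp
      simp only [List.length_append, List.length_cons, List.length_nil] at this
      simp only [hcnt, List.length_cons]
      omega

-- ---- length bookkeeping ----

lemma pv_strip_len (s : List Char) : (PySem.Chars.strip s).length ≤ s.length := by
  unfold PySem.Chars.strip PySem.Chars.rstrip PySem.Chars.lstrip
  have h1 := List.length_dropWhile_le PySem.Chars.isspace s
  have h2 := List.length_dropWhile_le PySem.Chars.isspace (List.dropWhile PySem.Chars.isspace s).reverse
  simp only [List.length_reverse] at *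
  exact le_trans h2 h1

lemma pv_norm_cases (s : List Char) :
    pvNormalize s = "unknown".toList ∨
      (pvNormalize s = PySem.Chars.strip s ∧ (pvNormalize s).length ≤ s.length) := by
  unfold pvNormalize
  by_cases h : PySem.Chars.strip s ≠ []
  · right
    rw [if_pos h]
    exact ⟨rfl, pv_strip_len s⟩
  · left
    rw [if_neg h]

lemma pv_norm_len {s : List Char}
    (h : ¬(pvNormalize s = [] ∨ pvNormalize s = "unknown".toList ∨ pvNormalize s = "Any".toList ∨
          pvNormalize s = "object".toList ∨ pvNormalize s = "None".toList)) :
    (pvNormalize s).length ≤ s.length := by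
  rcases pv_norm_cases s with hu | ⟨-, hle⟩
  · exact absurd (Or.inr (Or.inl hu)) h
  · exact hle

lemma pv_sum1_append (xs ys : List (List Char)) : pvSum1 (xs ++ ys) = pvSum1 xs + pvSum1 ys := by
  simp [pvSum1]

lemma pv_mu_append (xs ys : List (List Char)) : pvMu (xs ++ ys) = pvMu xs + pvMu ys := by
  simp [pvMu]

lemma pv_mu_reverse (xs : List (List Char)) : pvMu xs.reverse = pvMu xs := by
  simp [pvMu]

lemma pv_mu_cons (s : List Char) (rest : List (List Char)) :
    pvMu (s :: rest) = 2 * s.length + 1 + pvMu rest := by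
  simp only [pvMu, List.map_cons, List.sum_cons]

lemma pv_mu_sum1 (ps : List (List Char)) : pvMu ps + ps.length = 2 * pvSum1 ps := by
  induction ps with
  | nil => simp [pvMu, pvSum1]
  | cons p ps ih =>
    simp only [pvMu, pvSum1, List.map_cons, List.sum_cons, List.length_cons] at *
    omega

lemma pv_mem_sum1 (ps : List (List Char)) (p : List Char) (hp : p ∈ ps) :
    p.length + 1 ≤ pvSum1 ps := by
  have hm : (p.length + 1) ∈ ps.map (fun l => l.length + 1) :=
    List.mem_map_of_mem hp
  exact List.le_sum_of_mem hm

lemma pv_count_pos {t : List Char} (h : PySem.Chars.isIn ['|'] t = true) : 1 ≤ t.count '|' := by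
  rw [PySem.Chars.isIn_iff_infix, List.singleton_infix_iff] at h
  exact List.count_pos_iff.mpr h

lemma pv_mu_split1 (t : List Char) (hcnt : 1 ≤ t.count '|') :
    pvMu (pvSplit1 '|' [] t) ≤ 2 * t.length := by
  have h1 := pv_mu_sum1 (pvSplit1 '|' [] t)
  have h2 := pv_split1_sum1 '|' t []
  have h3 := pv_split1_len '|' t []
  simp only [List.length_nil] at h2
  omega

-- ---- _split_generic_types size bound ----

lemma pv_sg_step_bound (st : List (List Char) × List Char × Nat) (ch : Char) :
    pvSum1 (pvSGStep st ch).1 + (pvSGStep st ch).2.1.length ≤ pvSum1 st.1 + st.2.1.length + 1 := by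
  obtain ⟨out, part, depth⟩ := st
  have hsp := pv_strip_len part
  simp only [pvSGStep]
  split_ifs <;>
    simp only [pvSum1, List.map_append, List.sum_append, List.map_cons, List.map_nil,
      List.sum_cons, List.sum_nil, List.length_append, List.length_cons, List.length_nil] <;>
    omega

lemma pv_sg_fold_bound : ∀ (text : List Char) (st : List (List Char) × List Char × Nat),
    pvSum1 (text.foldl pvSGStep st).1 + (text.foldl pvSGStep st).2.1.length ≤
      pvSum1 st.1 + st.2.1.length + text.length := by
  intro text
  induction text with
  | nil => intro st; simp
  | cons ch text ih =>
    intro st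
    simp only [List.foldl_cons, List.length_cons]
    have h1 := ih (pvSGStep st ch)
    have h2 := pv_sg_step_bound st ch
    omega

lemma pv_sg_sum (text : List Char) : pvSum1 (pvSplitGeneric text) ≤ text.length + 1 := by
  simp only [pvSplitGeneric]
  have h := pv_sg_fold_bound text ([], [], 0)
  have hsp := pv_strip_len (text.foldl pvSGStep ([], [], 0)).2.1
  by_cases hl : PySem.Chars.strip (text.foldl pvSGStep ([], [], 0)).2.1 ≠ []
  · rw [if_pos hl, pv_sum1_append]
    simp only [pvSum1, List.map_cons, List.map_nil, List.sum_cons, List.sum_nil,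
      List.length_nil] at *
    omega
  · rw [if_neg hl]
    simp only [pvSum1, List.map_nil, List.sum_nil, List.length_nil] at *
    omega

-- ---- bracket decomposition ----

lemma pv_singleton_prefix_drop {t : List Char} {c : Char} {j : Nat} (hj : j < t.length)
    (h : t[j] = c) : [c] <+: t.drop j := by
  rw [List.drop_eq_getElem_cons hj, h]
  exact ⟨t.drop (j + 1), rfl⟩

lemma pv_mem_isIn {c : Char} {t : List Char} (h : c ∈ t) : PySem.Chars.isIn [c] t = true := by
  rw [PySem.Chars.isIn_iff_infix, List.singleton_infix_iff]
  exact h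

lemma pv_sw_isIn {t p : List Char} {c : Char} (hsw : PySem.Chars.startswith t p = true)
    (hc : c ∈ p) : PySem.Chars.isIn [c] t = true := by
  rw [PySem.Chars.startswith_iff] at hsw
  exact pv_mem_isIn (hsw.mem hc)

lemma pv_slice_mid (xs : List Char) (k : Nat) :
    PySem.Chars.slice xs (some (k : Int)) (some (-1)) = (xs.drop k).dropLast := by
  simp only [PySem.Chars.slice, PySem.List.slice, PySem.List.clampIdx]
  rw [if_neg (show ¬((k : Int) < 0) by omega), if_pos (show (-1 : Int) < 0 by omega)]
  by_cases h0 : xs.length = 0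
  · have hxs : xs = [] := List.length_eq_zero_iff.mp h0
    subst hxs
    simp
  · rw [if_neg (show ¬((xs.length : Int) + (-1) < 0) by omega)]
    have htn : ((k : Int)).toNat = k := by omega
    have hb : ((xs.length : Int) + (-1)).toNat = xs.length - 1 := by omega
    rw [htn, hb]
    by_cases hk : k ≤ xs.length
    · rw [min_eq_left hk, List.dropLast_eq_take, List.length_drop]
      congr 1
      omega
    · have h2 : xs.drop k = [] := List.drop_eq_nil_of_le (by omega)
      rw [min_eq_right (by omega), List.drop_length, h2]
      simp

lemma pv_bracket_decomp (t : List Char) (he : PySem.Chars.endswith t [']'] = true)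
    (hin : PySem.Chars.isIn ['['] t = true) :
    ∃ head u, t = head ++ '[' :: (u ++ [']']) ∧ '[' ∉ head ∧
      PySem.Chars.find t ['['] = (head.length : Int) ∧
      PySem.Chars.slice t none (some (PySem.Chars.find t ['['])) = head ∧
      PySem.Chars.slice t (some (PySem.Chars.find t ['['] + 1)) (some (-1)) = u := by
  have hnn : 0 ≤ PySem.Chars.find t ['['] := by
    rw [PySem.Chars.find_nonneg_iff]
    exact (PySem.Chars.isIn_iff_infix _ _).mp hin
  obtain ⟨hpre, hmin⟩ := PySem.Chars.find_spec hnn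
  have hle : (PySem.Chars.find t ['[']) ≤ (t.length : Int) := PySem.Chars.find_le_length t _
  set n := (PySem.Chars.find t ['[']).toNat with hn
  obtain ⟨w, hw⟩ : ∃ w, t.drop n = '[' :: w := by
    rcases hpre with ⟨tail, htail⟩
    exact ⟨tail, htail.symm⟩
  have hnlt : n < t.length := by
    by_contra hcon
    have hd : t.drop n = [] := List.drop_eq_nil_of_le (by omega)
    rw [hd] at hw
    exact absurd hw (by simp)
  have hdec : t = t.take n ++ '[' :: w := by
    conv_lhs => rw [← List.take_append_drop n t]
    rw [hw]
  have hnotin : '[' ∉ t.take n := by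
    intro hmem
    obtain ⟨j, hjlt, hj⟩ := List.getElem_of_mem hmem
    have hjn : j < n := by
      simp only [List.length_take] at hjlt
      omega
    have hjt : t[j]'(by omega) = '[' := by
      rw [← hj]
      exact (List.getElem_take ..).symm
    exact hmin j hjn (pv_singleton_prefix_drop (by omega) hjt)
  have hsuf : [']'] <:+ t := (PySem.Chars.endswith_iff _ _).mp he
  have hlast : t.getLast? = some ']' := by
    rcases hsuf with ⟨pre, hpre'⟩
    rw [← hpre']
    exact List.getLast?_concat
  have hwne : w ≠ [] := by
    intro hw0
    subst hw0
    rw [hdec, List.getLast?_concat] at hlast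
    exact absurd (Option.some.inj hlast) (by decide)
  have hlastc : w.getLast hwne = ']' := by
    have hrw : t = (t.take n ++ '[' :: w.dropLast) ++ [w.getLast hwne] := by
      conv_lhs => rw [hdec]
      conv_lhs => rw [← List.dropLast_append_getLast hwne]
      simp
    rw [hrw, List.getLast?_concat] at hlast
    exact (Option.some.inj hlast).symm ▸ rfl
  have hwdec : w.dropLast ++ [']'] = w := by
    conv_rhs => rw [← List.dropLast_append_getLast hwne]
    rw [hlastc]
  have htaken : (t.take n).length = n := by
    simp only [List.length_take]
    omega
  refine ⟨t.take n, w.dropLast, ?_, hnotin, ?_, ?_, ?_⟩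
  · conv_lhs => rw [hdec]
    rw [hwdec]
  · rw [htaken]
    omega
  · have hfi : PySem.Chars.find t ['['] = ((n : Nat) : Int) := by omega
    rw [PySem.Chars.slice_eq_listSlice, hfi, PySem.List.slice_to_natCast]
  · have hfi : PySem.Chars.find t ['['] + 1 = (((n + 1 : Nat)) : Int) := by omega
    rw [hfi, pv_slice_mid]
    have hdrop : t.drop (n + 1) = w := by
      conv_lhs => rw [hdec]
      rw [show n + 1 = (t.take n).length + 1 from by rw [htaken]]
      rw [List.drop_append]
      simp
    rw [hdrop]

-- ---- startswith vs head equality ----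

lemma pv_sw_iff (name head w : List Char) (hno : '[' ∉ name) (hnh : '[' ∉ head) :
    PySem.Chars.startswith (head ++ '[' :: w) (name ++ ['[']) = true ↔ name = head := by
  constructor
  · intro hsw
    rw [PySem.Chars.startswith_iff] at hsw
    have hname : name <+: head ++ '[' :: w := (List.prefix_append name ['[']).trans hsw
    have hhead : head <+: head ++ '[' :: w := ⟨'[' :: w, rfl⟩
    have hleq : name.length = head.length := by
      by_contra hne
      rcases Nat.lt_or_ge name.length head.length with hlt | hge
      · have h1 : (name ++ ['['])[name.length]'(by simp) = '[' := by
          rw [List.getElem_append_right (show name.length ≤ name.length from le_refl _)]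
          simp
        have h2 : (head ++ '[' :: w)[name.length]'(by simp; omega) = '[' :=
          (hsw.getElem (i := name.length) (by simp)).symm.trans h1
        have h3 : (head ++ '[' :: w)[name.length]'(by simp; omega) ∈ head := by
          rw [List.getElem_append_left (show name.length < head.length from hlt)]
          exact List.getElem_mem _
        exact hnh (h2 ▸ h3)
      · have hlt : head.length < name.length := by omega
        have h1 : (head ++ '[' :: w)[head.length]'(by simp) = '[' := by
          rw [List.getElem_append_right (show head.length ≤ head.length from le_refl _)]
          simp
        have h2 : (name ++ ['['])[head.length]'(by simp; omega) ∈ name := by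
          rw [List.getElem_append_left (show head.length < name.length from hlt)]
          exact List.getElem_mem _
        have h3 : (name ++ ['['])[head.length]'(by simp; omega) = '[' :=
          (hsw.getElem (i := head.length) (by simp; omega)).trans h1
        exact hno (h3 ▸ h2)
    rcases List.prefix_or_prefix_of_prefix hname hhead with h | h
    · exact h.eq_of_length hleq
    · exact (h.eq_of_length hleq.symm).symm
  · intro h
    subst h
    rw [PySem.Chars.startswith_iff]
    exact ⟨w, by simp⟩

lemma pv_sw_eq_decide (name head w : List Char) (hno : '[' ∉ name) (hnh : '[' ∉ head) :
    PySem.Chars.startswith (head ++ '[' :: w) (name ++ ['[']) = decide (name = head) := by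
  have h := pv_sw_iff name head w hno hnh
  cases hb : PySem.Chars.startswith (head ++ '[' :: w) (name ++ ['[']) with
  | true => exact (decide_eq_true (h.mp hb)).symm
  | false =>
    have hne : name ≠ head := fun hx => by
      rw [h.mpr hx] at hb
      exact absurd hb (by simp)
    exact (decide_eq_false hne).symm

-- ---- the arity table ----

lemma pv_lookup_cases (head : List Char) (r : Nat × Option Nat)
    (h : pvArityTable.lookup head = some r) :
    (head = "list".toList ∧ r = (1, some 1)) ∨ (head = "set".toList ∧ r = (1, some 1)) ∨
    (head = "dict".toList ∧ r = (2, some 2)) ∨ (head = "tuple".toList ∧ r = (1, none)) := by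
  simp only [pvArityTable, List.lookup] at h
  split at h
  · exact Or.inl ⟨by rename_i hx; exact beq_iff_eq.mp hx, (Option.some.inj h).symm⟩
  · split at h
    · exact Or.inr (Or.inl ⟨by rename_i _ hx; exact beq_iff_eq.mp hx, (Option.some.inj h).symm⟩)
    · split at h
      · exact Or.inr (Or.inr (Or.inl ⟨by rename_i _ _ hx; exact beq_iff_eq.mp hx,
          (Option.some.inj h).symm⟩))
      · split at h
        · exact Or.inr (Or.inr (Or.inr ⟨by rename_i _ _ _ hx; exact beq_iff_eq.mp hx,
            (Option.some.inj h).symm⟩))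
        · exact absurd h (by simp)

-- arity normal forms
lemma pv_ar11 (parts : List (List Char)) (g : List Char → Bool) :
    (!pvBad 1 (some 1) parts && parts.all g) = (decide (parts.length = 1) && g (parts[0]?.getD [])) := by
  match parts with
  | [] => rfl
  | [p] => simp [pvBad]
  | p :: q :: r => simp [pvBad]

lemma pv_ar22 (parts : List (List Char)) (g : List Char → Bool) :
    (!pvBad 2 (some 2) parts && parts.all g) =
      (decide (parts.length = 2) && (g (parts[0]?.getD []) && g (parts[1]?.getD []))) := by
  match parts with
  | [] => rfl
  | [p] => simp [pvBad]
  | [p, q] => simp [pvBad]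
  | p :: q :: r :: s => simp [pvBad]

lemma pv_ar1none (parts : List (List Char)) (g : List Char → Bool) :
    (!pvBad 1 none parts && parts.all g) = (decide (0 < parts.length) && parts.all g) := by
  match parts with
  | [] => rfl
  | p :: r => simp [pvBad]

-- ---- A's chain through the shared bracket classification ----

lemma pv_chain_nobr (g : List Char → Bool) (t : List Char)
    (hbr : (PySem.Chars.endswith t [']'] && PySem.Chars.isIn ['['] t) = false) :
    pvChainA g t = true := by
  unfold pvChainA
  cases he : PySem.Chars.endswith t [']'] with
  | false =>
    rw [if_neg (by simp [he]), if_neg (by simp [he]), if_neg (by simp [he]), if_neg (by simp [he])]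
  | true =>
    have hin : PySem.Chars.isIn ['['] t = false := by
      rw [he] at hbr
      simpa using hbr
    have hsw : ∀ p : List Char, '[' ∈ p → PySem.Chars.startswith t p = false := by
      intro p hp
      cases h : PySem.Chars.startswith t p with
      | false => rfl
      | true => rw [pv_sw_isIn h hp] at hin; exact absurd hin (by simp)
    rw [if_neg (by rw [hsw "list[".toList (by decide)]; simp),
        if_neg (by rw [hsw "tuple[".toList (by decide)]; simp),
        if_neg (by rw [hsw "dict[".toList (by decide)]; simp),
        if_neg (by rw [hsw "set[".toList (by decide)]; simp)]

lemma pv_chain_brnone (g : List Char → Bool) (t : List Char)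
    (hbr : (PySem.Chars.endswith t [']'] && PySem.Chars.isIn ['['] t) = true)
    (hl : pvArityTable.lookup (PySem.Chars.slice t none (some (PySem.Chars.find t ['[']))) = none) :
    pvChainA g t = true := by
  obtain ⟨he, hin⟩ := Bool.and_eq_true_iff.mp hbr
  obtain ⟨head, u, ht, hnh, hfind, hslh, hsli⟩ := pv_bracket_decomp t he hin
  rw [hslh] at hl
  have hd : ∀ (name : List Char) (v : Nat × Option Nat), '[' ∉ name →
      pvArityTable.lookup name = some v → PySem.Chars.startswith t (name ++ ['[']) = false := by
    intro name v hno hv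
    rw [ht, pv_sw_eq_decide name head _ hno hnh]
    apply decide_eq_false
    intro hx
    rw [← hx, hv] at hl
    exact absurd hl (by simp)
  unfold pvChainA
  rw [show ("list[".toList : List Char) = "list".toList ++ ['['] from by decide,
      show ("tuple[".toList : List Char) = "tuple".toList ++ ['['] from by decide,
      show ("dict[".toList : List Char) = "dict".toList ++ ['['] from by decide,
      show ("set[".toList : List Char) = "set".toList ++ ['['] from by decide]
  rw [if_neg (by rw [hd "list".toList (1, some 1) (by decide) (by decide)]; simp),
      if_neg (by rw [hd "tuple".toList (1, none) (by decide) (by decide)]; simp),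
      if_neg (by rw [hd "dict".toList (2, some 2) (by decide) (by decide)]; simp),
      if_neg (by rw [hd "set".toList (1, some 1) (by decide) (by decide)]; simp)]

lemma pv_chain_some (g : List Char → Bool) (t : List Char) (lo : Nat) (hi : Option Nat)
    (hbr : (PySem.Chars.endswith t [']'] && PySem.Chars.isIn ['['] t) = true)
    (hl : pvArityTable.lookup (PySem.Chars.slice t none (some (PySem.Chars.find t ['['])))
          = some (lo, hi)) :
    pvChainA g t =
      (!pvBad lo hi (pvSplitGeneric (PySem.Chars.slice t
          (some (PySem.Chars.find t ['['] + 1)) (some (-1)))) &&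
        (pvSplitGeneric (PySem.Chars.slice t
          (some (PySem.Chars.find t ['['] + 1)) (some (-1)))).all g) := by
  obtain ⟨he, hin⟩ := Bool.and_eq_true_iff.mp hbr
  obtain ⟨head, u, ht, hnh, hfind, hslh, hsli⟩ := pv_bracket_decomp t he hin
  rw [hslh] at hl
  have hsw : ∀ name : List Char, '[' ∉ name →
      PySem.Chars.startswith t (name ++ ['[']) = decide (name = head) := by
    intro name hno
    rw [ht]
    exact pv_sw_eq_decide name head _ hno hnh
  rcases pv_lookup_cases head (lo, hi) hl with ⟨hh, hr⟩ | ⟨hh, hr⟩ | ⟨hh, hr⟩ | ⟨hh, hr⟩ <;>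
    simp only [Prod.mk.injEq] at hr <;> obtain ⟨rfl, rfl⟩ := hr
  · -- list
    have s1 : PySem.Chars.startswith t "list[".toList = true := by
      rw [show ("list[".toList : List Char) = "list".toList ++ ['['] from by decide,
          hsw "list".toList (by decide)]
      exact decide_eq_true hh.symm
    have h5 : PySem.Chars.find t ['['] + 1 = (5 : Int) := by
      rw [hfind, hh]; decide
    unfold pvChainA
    rw [if_pos (by rw [s1, he]; rfl), h5]
    exact (pv_ar11 _ g).symm
  · -- set
    have s1 : PySem.Chars.startswith t "list[".toList = false := by
      rw [show ("list[".toList : List Char) = "list".toList ++ ['['] from by decide,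
          hsw "list".toList (by decide)]
      exact decide_eq_false (fun hx => by rw [hh] at hx; exact absurd hx (by decide))
    have s2 : PySem.Chars.startswith t "tuple[".toList = false := by
      rw [show ("tuple[".toList : List Char) = "tuple".toList ++ ['['] from by decide,
          hsw "tuple".toList (by decide)]
      exact decide_eq_false (fun hx => by rw [hh] at hx; exact absurd hx (by decide))
    have s3 : PySem.Chars.startswith t "dict[".toList = false := by
      rw [show ("dict[".toList : List Char) = "dict".toList ++ ['['] from by decide,
          hsw "dict".toList (by decide)]
      exact decide_eq_false (fun hx => by rw [hh] at hx; exact absurd hx (by decide))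
    have s4 : PySem.Chars.startswith t "set[".toList = true := by
      rw [show ("set[".toList : List Char) = "set".toList ++ ['['] from by decide,
          hsw "set".toList (by decide)]
      exact decide_eq_true hh.symm
    have h4 : PySem.Chars.find t ['['] + 1 = (4 : Int) := by
      rw [hfind, hh]; decide
    unfold pvChainA
    rw [if_neg (by rw [s1]; simp), if_neg (by rw [s2]; simp), if_neg (by rw [s3]; simp),
        if_pos (by rw [s4, he]; rfl), h4]
    exact (pv_ar11 _ g).symm
  · -- dict
    have s1 : PySem.Chars.startswith t "list[".toList = false := by
      rw [show ("list[".toList : List Char) = "list".toList ++ ['['] from by decide,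
          hsw "list".toList (by decide)]
      exact decide_eq_false (fun hx => by rw [hh] at hx; exact absurd hx (by decide))
    have s2 : PySem.Chars.startswith t "tuple[".toList = false := by
      rw [show ("tuple[".toList : List Char) = "tuple".toList ++ ['['] from by decide,
          hsw "tuple".toList (by decide)]
      exact decide_eq_false (fun hx => by rw [hh] at hx; exact absurd hx (by decide))
    have s3 : PySem.Chars.startswith t "dict[".toList = true := by
      rw [show ("dict[".toList : List Char) = "dict".toList ++ ['['] from by decide,
          hsw "dict".toList (by decide)]
      exact decide_eq_true hh.symm
    have h5 : PySem.Chars.find t ['['] + 1 = (5 : Int) := by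
      rw [hfind, hh]; decide
    unfold pvChainA
    rw [if_neg (by rw [s1]; simp), if_neg (by rw [s2]; simp), if_pos (by rw [s3, he]; rfl), h5]
    exact (pv_ar22 _ g).symm
  · -- tuple
    have s1 : PySem.Chars.startswith t "list[".toList = false := by
      rw [show ("list[".toList : List Char) = "list".toList ++ ['['] from by decide,
          hsw "list".toList (by decide)]
      exact decide_eq_false (fun hx => by rw [hh] at hx; exact absurd hx (by decide))
    have s2 : PySem.Chars.startswith t "tuple[".toList = true := by
      rw [show ("tuple[".toList : List Char) = "tuple".toList ++ ['['] from by decide,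
          hsw "tuple".toList (by decide)]
      exact decide_eq_true hh.symm
    have h6 : PySem.Chars.find t ['['] + 1 = (6 : Int) := by
      rw [hfind, hh]; decide
    unfold pvChainA
    rw [if_neg (by rw [s1]; simp), if_pos (by rw [s2, he]; rfl), h6]
    exact (pv_ar1none _ g).symm

lemma pv_sizes (t : List Char) (lo : Nat) (hi : Option Nat)
    (hbr : (PySem.Chars.endswith t [']'] && PySem.Chars.isIn ['['] t) = true)
    (hl : pvArityTable.lookup (PySem.Chars.slice t none (some (PySem.Chars.find t ['['])))
          = some (lo, hi)) :
    pvMu (pvSplitGeneric (PySem.Chars.slice t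
        (some (PySem.Chars.find t ['['] + 1)) (some (-1)))) + 8 ≤ 2 * t.length ∧
    ∀ p ∈ pvSplitGeneric (PySem.Chars.slice t
        (some (PySem.Chars.find t ['['] + 1)) (some (-1))), p.length + 5 ≤ t.length := by
  obtain ⟨he, hin⟩ := Bool.and_eq_true_iff.mp hbr
  obtain ⟨head, u, ht, hnh, hfind, hslh, hsli⟩ := pv_bracket_decomp t he hin
  rw [hslh] at hl
  have hh3 : 3 ≤ head.length := by
    rcases pv_lookup_cases head (lo, hi) hl with ⟨hh, -⟩ | ⟨hh, -⟩ | ⟨hh, -⟩ | ⟨hh, -⟩ <;>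
      rw [hh] <;> decide
  rw [hsli]
  have htl : t.length = head.length + u.length + 2 := by
    rw [ht]
    simp
    omega
  have hsum := pv_sg_sum u
  have hmu := pv_mu_sum1 (pvSplitGeneric u)
  constructor
  · omega
  · intro p hp
    have := pv_mem_sum1 (pvSplitGeneric u) p hp
    omega

-- ---- congruence helpers ----

lemma pv_all_congr {l : List (List Char)} {f g : List Char → Bool}
    (h : ∀ p ∈ l, f p = g p) : l.all f = l.all g := by
  induction l with
  | nil => rfl
  | cons a l ih =>
    simp only [List.all_cons]
    rw [h a (by simp), ih (fun p hp => h p (by simp [hp]))]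

lemma pv_all_rev_append (xs ys : List (List Char)) (g : List Char → Bool) :
    (xs.reverse ++ ys).all g = (xs.all g && ys.all g) := by
  simp [List.all_append]

-- ---- fuel stability of A's recursion ----

lemma pvIsA_stable : ∀ (k : Nat) (s : List Char), s.length ≤ k →
    ∀ n m, s.length < n → s.length < m → pvIsA n s = pvIsA m s := by
  intro k
  induction k with
  | zero =>
    intro s hs n m hn hm
    have hs0 : s = [] := List.length_eq_zero_iff.mp (by omega)
    subst hs0
    obtain ⟨n, rfl⟩ : ∃ n', n = n' + 1 := ⟨n - 1, by omega⟩
    obtain ⟨m, rfl⟩ : ∃ m', m = m' + 1 := ⟨m - 1, by omega⟩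
    rw [pvIsA_succ, pvIsA_succ]
    have hR : pvNormalize ([] : List Char) = "unknown".toList := by decide
    rw [if_pos (Or.inr (Or.inl hR)), if_pos (Or.inr (Or.inl hR))]
  | succ k ih =>
    intro s hs n m hn hm
    obtain ⟨n, rfl⟩ : ∃ n', n = n' + 1 := ⟨n - 1, by omega⟩
    obtain ⟨m, rfl⟩ : ∃ m', m = m' + 1 := ⟨m - 1, by omega⟩
    rw [pvIsA_succ, pvIsA_succ]
    by_cases hR : (pvNormalize s = [] ∨ pvNormalize s = "unknown".toList ∨
        pvNormalize s = "Any".toList ∨ pvNormalize s = "object".toList ∨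
        pvNormalize s = "None".toList)
    · rw [if_pos hR, if_pos hR]
    · rw [if_neg hR, if_neg hR]
      have htle := pv_norm_len hR
      by_cases hU : PySem.Chars.isIn ['|'] (pvNormalize s) = true
      · rw [if_pos hU, if_pos hU, pv_splitOn_eq]
        apply pv_all_congr
        intro p hp
        have hcnt := pv_count_pos hU
        have hplen := pv_split1_part '|' (pvNormalize s) [] p hp
        simp only [List.length_nil, Nat.zero_add] at hplen
        exact ih p (by omega) n m (by omega) (by omega)
      · rw [if_neg hU, if_neg hU]
        by_cases hbr : (PySem.Chars.endswith (pvNormalize s) [']'] &&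
            PySem.Chars.isIn ['['] (pvNormalize s)) = true
        · cases hl : pvArityTable.lookup (PySem.Chars.slice (pvNormalize s) none
              (some (PySem.Chars.find (pvNormalize s) ['[']))) with
          | none => rw [pv_chain_brnone _ _ hbr hl, pv_chain_brnone _ _ hbr hl]
          | some r =>
            obtain ⟨lo, hi⟩ := r
            rw [pv_chain_some _ _ lo hi hbr hl, pv_chain_some _ _ lo hi hbr hl]
            obtain ⟨hmu, hps⟩ := pv_sizes _ lo hi hbr hl
            congr 1
            apply pv_all_congr
            intro p hp
            have := hps p hp
            exact ih p (by omega) n m (by omega) (by omega)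
        · have hbr' : (PySem.Chars.endswith (pvNormalize s) [']'] &&
              PySem.Chars.isIn ['['] (pvNormalize s)) = false := by
            cases hx : (PySem.Chars.endswith (pvNormalize s) [']'] &&
                PySem.Chars.isIn ['['] (pvNormalize s)) with
            | true => exact absurd hx hbr
            | false => rfl
          rw [pv_chain_nobr _ _ hbr', pv_chain_nobr _ _ hbr']

-- ---- the main loop lemma: B's worklist computes A's recursion ----

lemma pvLoopB_eq : ∀ (f : Nat) (pending : List (List Char)), pvMu pending ≤ f →
    pvLoopB f pending = pending.all (fun l => pvIsA (l.length + 1) l) := by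
  intro f
  induction f with
  | zero =>
    intro pending hmu
    cases pending with
    | nil => rfl
    | cons s rest =>
      rw [pv_mu_cons] at hmu
      omega
  | succ f ih =>
    intro pending hmu
    cases pending with
    | nil => rfl
    | cons s rest =>
      rw [pv_mu_cons] at hmu
      have hrest : pvMu rest ≤ f := by omega
      rw [List.all_cons, pvIsA_succ s.length s]
      by_cases hR : (pvNormalize s = [] ∨ pvNormalize s = "unknown".toList ∨
          pvNormalize s = "Any".toList ∨ pvNormalize s = "object".toList ∨
          pvNormalize s = "None".toList)
      · rw [pvLoopB_res f s rest hR, if_pos hR]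
        simp
      · rw [if_neg hR]
        have htle := pv_norm_len hR
        by_cases hU : PySem.Chars.isIn ['|'] (pvNormalize s) = true
        · rw [pvLoopB_union f s rest hR hU, if_pos hU]
          have hcnt := pv_count_pos hU
          rw [ih ((PySem.Chars.splitOn (pvNormalize s) ['|']).reverse ++ rest) (by
            rw [pv_mu_append, pv_mu_reverse, pv_splitOn_eq]
            have := pv_mu_split1 (pvNormalize s) hcnt
            omega)]
          rw [pv_all_rev_append]
          congr 1
          rw [pv_splitOn_eq]
          apply pv_all_congr
          intro p hp
          have hplen := pv_split1_part '|' (pvNormalize s) [] p hp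
          simp only [List.length_nil, Nat.zero_add] at hplen
          exact pvIsA_stable p.length p (le_refl _) (p.length + 1) s.length (by omega) (by omega)
        · rw [if_neg hU]
          by_cases hbr : (PySem.Chars.endswith (pvNormalize s) [']'] &&
              PySem.Chars.isIn ['['] (pvNormalize s)) = true
          · cases hl : pvArityTable.lookup (PySem.Chars.slice (pvNormalize s) none
                (some (PySem.Chars.find (pvNormalize s) ['[']))) with
            | none =>
              rw [pvLoopB_brnone f s rest hR hU hbr hl, pv_chain_brnone _ _ hbr hl,
                ih rest hrest]
              simp
            | some r =>
              obtain ⟨lo, hi⟩ := r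
              rw [pvLoopB_br f s rest lo hi hR hU hbr hl, pv_chain_some _ _ lo hi hbr hl]
              obtain ⟨hmup, hps⟩ := pv_sizes _ lo hi hbr hl
              by_cases hbad : pvBad lo hi (pvSplitGeneric (PySem.Chars.slice (pvNormalize s)
                  (some (PySem.Chars.find (pvNormalize s) ['['] + 1)) (some (-1)))) = true
              · rw [if_pos hbad, hbad]
                simp
              · rw [if_neg hbad]
                have hbadf : pvBad lo hi (pvSplitGeneric (PySem.Chars.slice (pvNormalize s)
                    (some (PySem.Chars.find (pvNormalize s) ['['] + 1)) (some (-1)))) = false := by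
                  cases hx : pvBad lo hi (pvSplitGeneric (PySem.Chars.slice (pvNormalize s)
                      (some (PySem.Chars.find (pvNormalize s) ['['] + 1)) (some (-1)))) with
                  | true => exact absurd hx hbad
                  | false => rfl
                rw [hbadf]
                simp only [Bool.not_false, Bool.true_and]
                rw [ih ((pvSplitGeneric (PySem.Chars.slice (pvNormalize s)
                    (some (PySem.Chars.find (pvNormalize s) ['['] + 1)) (some (-1)))).reverse ++ rest) (by
                  rw [pv_mu_append, pv_mu_reverse]
                  omega)]
                rw [pv_all_rev_append]
                congr 1
                apply pv_all_congr
                intro p hp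
                have := hps p hp
                exact pvIsA_stable p.length p (le_refl _) (p.length + 1) s.length (by omega) (by omega)
          · have hbr' : (PySem.Chars.endswith (pvNormalize s) [']'] &&
                PySem.Chars.isIn ['['] (pvNormalize s)) = false := by
              cases hx : (PySem.Chars.endswith (pvNormalize s) [']'] &&
                  PySem.Chars.isIn ['['] (pvNormalize s)) with
              | true => exact absurd hx hbr
              | false => rfl
            rw [pvLoopB_nobr f s rest hR hU hbr, pv_chain_nobr _ _ hbr', ih rest hrest]
            simp

-- ===== VERDICT (by name: the statement is the Claim_ definition above) =====
theorem is_concrete_type_py_spec : Claim_equal_is_concrete_type_py := by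
  intro type_name _
  unfold Spec_is_concrete_type_py is_concrete_type_py is_concrete_type_py_alt
  rw [pvLoopB_eq (2 * type_name.toList.length + 1) [type_name.toList]
    (by simp only [pvMu, List.map_cons, List.map_nil, List.sum_cons, List.sum_nil]; omega)]
  simp
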